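-- pv_equiv track=rewrite | github.com/gnowledge/nodeBook | backend/core/extract_node_sections_from_markdown.py | extract_node_sections_from_markdown
-- ===== SOURCE A (Python) =====
-- from typing import List, Dict
--
-- def extract_node_sections_from_markdown(md_text: str) -> List[Dict]:
--     sections = []
--     current_node = None
--     current_desc_lines = []
--     current_cnl_lines = []
--     in_cnl_block = False
--
--     lines = md_text.splitlines()
--
--     for line in lines:
--         line_strip = line.strip()
--
--         # Start of a new node section
--         if line_strip.startswith("# "):
--             if current_node:
--                 sections.append({
--                     "id": current_node,
--                     "description": "\n".join(current_desc_lines).strip(),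
--                     "cnl": "\n".join(current_cnl_lines).strip()
--                 })
--             current_node = line_strip[2:].strip()
--             current_desc_lines = []
--             current_cnl_lines = []
--             in_cnl_block = False
--         elif line_strip.startswith("```cnl"):
--             in_cnl_block = True
--         elif line_strip.startswith("```") and in_cnl_block:
--             in_cnl_block = False
--         else:
--             if in_cnl_block:
--                 current_cnl_lines.append(line)
--             else:
--                 current_desc_lines.append(line)
--
--     # Append the last section
--     if current_node:
--         sections.append({
--             "id": current_node,
--             "description": "\n".join(current_desc_lines).strip(),
--             "cnl": "\n".join(current_cnl_lines).strip()
--         })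
--
--     return sections
-- ===== SOURCE B (Python) =====
-- def extract_node_sections_from_markdown(md_text):
--     # pass 1: group the raw lines under each '# ' header (pre-header lines are dropped)
--     groups = []
--     cur = None  # (node_id, raw body lines) of the group being collected
--     for line in md_text.splitlines():
--         ls = line.strip()
--         if ls.startswith("# "):
--             if cur is not None:
--                 groups.append(cur)
--             cur = (ls[2:].strip(), [])
--         elif cur is not None:
--             cur[1].append(line)
--     if cur is not None:
--         groups.append(cur)
--     # pass 2: split each group's body into description / cnl lines via the fence flag
--     result = []
--     for node, body in groups:
--         desc, cnl, in_cnl = [], [], False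
--         for line in body:
--             ls = line.strip()
--             if ls.startswith("```cnl"):
--                 in_cnl = True
--             elif ls.startswith("```") and in_cnl:
--                 in_cnl = False
--             elif in_cnl:
--                 cnl.append(line)
--             else:
--                 desc.append(line)
--         result.append({"id": node,
--                        "description": "\n".join(desc).strip(),
--                        "cnl": "\n".join(cnl).strip()})
--     return result
-- ===== Notes on version B (the rewrite author's own statement) =====
-- stated objective: alternative
-- what changed: Replaces A's single interleaved state machine (five pieces of mutable state threaded through one loop with an end-of-loop flush duplicated in the body) by a two-pass decomposition: first group raw lines under their '# ' headers, then independently split each group's body into description/cnl lines and emit its section.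
import Mathlib
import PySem

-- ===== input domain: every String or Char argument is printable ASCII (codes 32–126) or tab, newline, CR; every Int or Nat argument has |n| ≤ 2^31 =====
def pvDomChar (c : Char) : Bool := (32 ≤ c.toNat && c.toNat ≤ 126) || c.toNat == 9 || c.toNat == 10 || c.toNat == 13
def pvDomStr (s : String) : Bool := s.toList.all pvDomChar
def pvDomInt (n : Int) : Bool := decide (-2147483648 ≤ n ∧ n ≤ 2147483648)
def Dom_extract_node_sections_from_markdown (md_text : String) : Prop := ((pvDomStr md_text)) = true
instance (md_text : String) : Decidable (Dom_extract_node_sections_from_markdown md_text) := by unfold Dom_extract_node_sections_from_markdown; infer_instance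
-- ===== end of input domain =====

-- B replaces A's single interleaved state machine by a two-pass decomposition
-- (group raw lines by header, then split each group's body); same cost, plainer structure.

-- the section dict both Pythons build: {"id":…, "description":…, "cnl":…}
def pvSection (node : String) (desc cnl : List String) : List (String × String) :=
  [("id", node),
   ("description", PySem.Str.strip (PySem.Str.join "\n" desc)),
   ("cnl", PySem.Str.strip (PySem.Str.join "\n" cnl))]

-- ===== PORT A =====
-- A's loop state: (sections, current_node, current_desc_lines, current_cnl_lines, in_cnl_block).
-- `if current_node:` is ported as the Option match: current_node is None or a header title
-- `line_strip[2:].strip()` of a stripped line starting '# ', which is never the empty string.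
def pvStepA (st : List (List (String × String)) × Option String × List String × List String × Bool)
    (line : String) : List (List (String × String)) × Option String × List String × List String × Bool :=
  match st with
  | (secs, cur, d, c, f) =>
    let ls := PySem.Str.strip line
    if PySem.Str.startswith ls "# " then
      let secs' := match cur with
        | some n => secs ++ [pvSection n d c]
        | none => secs
      (secs', some (PySem.Str.strip (PySem.Str.slice ls (some 2) none)), [], [], false)
    else if PySem.Str.startswith ls "```cnl" then (secs, cur, d, c, true)
    else if PySem.Str.startswith ls "```" && f then (secs, cur, d, c, false)
    else if f then (secs, cur, d, c ++ [line], f)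
    else (secs, cur, d ++ [line], c, f)

-- A's trailing "append the last section" block, on the loop's final state
def pvFinA (st : List (List (String × String)) × Option String × List String × List String × Bool) :
    List (List (String × String)) :=
  match st with
  | (secs, some n, d, c, _) => secs ++ [pvSection n d c]
  | (secs, none, _, _, _) => secs

def extract_node_sections_from_markdown (md_text : String) : List (List (String × String)) :=
  pvFinA ((PySem.Str.splitlines md_text).foldl pvStepA ([], none, [], [], false))

-- ===== PORT B =====
-- pass 1 step: groups so far × current (node, raw body lines) group
def pvStepB1 (st : List (String × List String) × Option (String × List String))
    (line : String) : List (String × List String) × Option (String × List String) :=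
  match st with
  | (gs, cur) =>
    let ls := PySem.Str.strip line
    if PySem.Str.startswith ls "# " then
      let gs' := match cur with
        | some g => gs ++ [g]
        | none => gs
      (gs', some (PySem.Str.strip (PySem.Str.slice ls (some 2) none), []))
    else match cur with
      | some (n, b) => (gs, some (n, b ++ [line]))
      | none => (gs, none)

-- flush the still-open group after pass 1
def pvFlush (st : List (String × List String) × Option (String × List String)) :
    List (String × List String) :=
  match st with
  | (gs, some g) => gs ++ [g]
  | (gs, none) => gs

def pvGroups (md_text : String) : List (String × List String) :=
  pvFlush ((PySem.Str.splitlines md_text).foldl pvStepB1 ([], none))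

-- pass 2 step: (desc_lines, cnl_lines, in_cnl)
def pvStepB2 (st : List String × List String × Bool) (line : String) :
    List String × List String × Bool :=
  match st with
  | (d, c, f) =>
    let ls := PySem.Str.strip line
    if PySem.Str.startswith ls "```cnl" then (d, c, true)
    else if PySem.Str.startswith ls "```" && f then (d, c, false)
    else if f then (d, c ++ [line], f)
    else (d ++ [line], c, f)

def pvEmit (g : String × List String) : List (String × String) :=
  match g.2.foldl pvStepB2 ([], [], false) with
  | (d, c, _) => pvSection g.1 d c

def extract_node_sections_from_markdown_alt (md_text : String) : List (List (String × String)) :=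
  (pvGroups md_text).map pvEmit

-- ===== PRECONDITION & SPEC =====
def Spec_extract_node_sections_from_markdown (md_text : String) (out : List (List (String × String))) : Prop := out = extract_node_sections_from_markdown_alt md_text
instance (md_text : String) (out : List (List (String × String))) : Decidable (Spec_extract_node_sections_from_markdown md_text out) := by unfold Spec_extract_node_sections_from_markdown; infer_instance

-- ===== CLAIM (what is proved, stated in full; the proofs are below) =====
def Claim_equal_extract_node_sections_from_markdown : Prop := ∀ (md_text : String), Dom_extract_node_sections_from_markdown md_text → Spec_extract_node_sections_from_markdown md_text (extract_node_sections_from_markdown md_text)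

-- ===== LEMMAS AND PROOFS =====

-- pass-1 accumulator lemma: already-closed groups just pass through
theorem pvFlush_acc (lines : List String) (gs : List (String × List String))
    (cur : Option (String × List String)) :
    pvFlush (lines.foldl pvStepB1 (gs, cur)) = gs ++ pvFlush (lines.foldl pvStepB1 ([], cur)) := by
  induction lines generalizing gs cur with
  | nil => cases cur <;> simp [pvFlush]
  | cons l ls ih =>
    simp only [List.foldl_cons, pvStepB1]
    by_cases h1 : PySem.Str.startswith (PySem.Str.strip l) "# " = true
    · simp only [if_pos h1]
      cases cur with
      | none => exact ih gs _
      | some g => rw [ih (gs ++ [g]), ih ([] ++ [g])]; simp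
    · simp only [if_neg h1]
      cases cur with
      | none => exact ih gs none
      | some g => obtain ⟨n, b⟩ := g; exact ih gs _

-- main invariant: A's loop, mid-group (n, body), equals B's remaining grouping
theorem pvMain (lines : List String) (n : String) (body : List String)
    (secs : List (List (String × String))) :
    pvFinA (lines.foldl pvStepA
        (secs, some n, (body.foldl pvStepB2 ([], [], false)).1,
          (body.foldl pvStepB2 ([], [], false)).2.1,
          (body.foldl pvStepB2 ([], [], false)).2.2))
      = secs ++ (pvFlush (lines.foldl pvStepB1 ([], some (n, body)))).map pvEmit := by
  induction lines generalizing n body secs with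
  | nil => simp [pvFinA, pvFlush, pvEmit]
  | cons l ls ih =>
    simp only [List.foldl_cons, pvStepA, pvStepB1]
    by_cases h1 : PySem.Str.startswith (PySem.Str.strip l) "# " = true
    · simp only [if_pos h1]
      rw [pvFlush_acc ls ([] ++ [(n, body)])]
      have h := ih (PySem.Str.strip (PySem.Str.slice (PySem.Str.strip l) (some 2) none)) []
        (secs ++ [pvSection n (body.foldl pvStepB2 ([], [], false)).1
          (body.foldl pvStepB2 ([], [], false)).2.1])
      simp only [List.foldl_nil] at h
      rw [h]
      simp [pvEmit, List.append_assoc]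
    · simp only [if_neg h1]
      have key := ih n (body ++ [l]) secs
      have hb : ((body ++ [l]).foldl pvStepB2 ([], [], false))
          = pvStepB2 (body.foldl pvStepB2 ([], [], false)) l := by
        rw [List.foldl_append]; rfl
      rw [hb] at key
      rcases hdec : body.foldl pvStepB2 ([], [], false) with ⟨d, c, f⟩
      simp only [hdec] at key ⊢
      simp only [pvStepB2] at key
      by_cases h2 : PySem.Str.startswith (PySem.Str.strip l) "```cnl" = true
      · simp only [if_pos h2] at key ⊢; exact key
      · simp only [if_neg h2] at key ⊢
        by_cases h3 : (PySem.Str.startswith (PySem.Str.strip l) "```" && f) = true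
        · simp only [if_pos h3] at key ⊢; exact key
        · simp only [if_neg h3] at key ⊢
          by_cases h4 : f = true
          · simp only [if_pos h4] at key ⊢; exact key
          · simp only [if_neg h4] at key ⊢; exact key

-- before the first header: A's pending desc/cnl lines are discarded; B collects nothing
theorem pvPre (lines : List String) (d c : List String) (f : Bool) :
    pvFinA (lines.foldl pvStepA ([], none, d, c, f))
      = (pvFlush (lines.foldl pvStepB1 ([], none))).map pvEmit := by
  induction lines generalizing d c f with
  | nil => simp [pvFinA, pvFlush]
  | cons l ls ih =>
    simp only [List.foldl_cons, pvStepA, pvStepB1]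
    by_cases h1 : PySem.Str.startswith (PySem.Str.strip l) "# " = true
    · simp only [if_pos h1]
      have h := pvMain ls (PySem.Str.strip (PySem.Str.slice (PySem.Str.strip l) (some 2) none)) [] []
      simp only [List.foldl_nil, List.nil_append] at h
      exact h
    · simp only [if_neg h1]
      by_cases h2 : PySem.Str.startswith (PySem.Str.strip l) "```cnl" = true
      · simp only [if_pos h2]; exact ih d c true
      · simp only [if_neg h2]
        by_cases h3 : (PySem.Str.startswith (PySem.Str.strip l) "```" && f) = true
        · simp only [if_pos h3]; exact ih d c false
        · simp only [if_neg h3]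
          by_cases h4 : f = true
          · simp only [if_pos h4]; exact ih d (c ++ [l]) f
          · simp only [if_neg h4]; exact ih (d ++ [l]) c f

-- ===== VERDICT (by name: the statement is the Claim_ definition above) =====
theorem extract_node_sections_from_markdown_spec : Claim_equal_extract_node_sections_from_markdown := by
  intro md_text _
  exact pvPre (PySem.Str.splitlines md_text) [] [] false
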